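-- pv_equiv track=rewrite | github.com/rbotla/agentic-patterns | patterns/multi_agent_debate.py | _parse_evidence
-- ===== SOURCE A (Python) =====
-- from typing import Dict, Any, Optional, List, Tuple, Set
--
-- def _parse_evidence(response: str) -> List[Dict]:
--     """Parse evidence from searcher response"""
--     evidence = []
--     lines = response.split('\n')
--
--     current_evidence = {}
--     for line in lines:
--         if "EVIDENCE:" in line:
--             if current_evidence:
--                 evidence.append(current_evidence)
--             current_evidence = {"fact": line.split(":")[-1].strip()}
--         elif "SOURCE:" in line and current_evidence:
--             current_evidence["source"] = line.split(":")[-1].strip()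
--         elif "RELEVANCE:" in line and current_evidence:
--             current_evidence["relevance"] = line.split(":")[-1].strip()
--
--     if current_evidence:
--         evidence.append(current_evidence)
--
--     return evidence if evidence else [{"fact": "General observation", "source": "5", "relevance": "Related"}]
-- ===== SOURCE B (Python) =====
-- from typing import Dict, List
--
-- def _parse_evidence(response: str) -> List[Dict]:
--     """Parse evidence from searcher response (block-partition version)."""
--     blocks = []
--     for line in response.split('\n'):
--         if "EVIDENCE:" in line:
--             blocks.append([line])
--         elif blocks:
--             blocks[-1].append(line)
--     result = []
--     for block in blocks:
--         d = {"fact": block[0].split(":")[-1].strip()}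
--         for line in block[1:]:
--             if "SOURCE:" in line:
--                 d["source"] = line.split(":")[-1].strip()
--             elif "RELEVANCE:" in line:
--                 d["relevance"] = line.split(":")[-1].strip()
--         result.append(d)
--     return result or [{"fact": "General observation", "source": "5", "relevance": "Related"}]
-- ===== Notes on version B (the rewrite author's own statement) =====
-- stated objective: alternative
-- what changed: B first partitions the lines into evidence blocks (a new block at each line containing 'EVIDENCE:', lines before the first marker dropped), then maps each block independently to its dict, instead of A's single stateful scan carrying a current-dict accumulator.
import Mathlib
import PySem

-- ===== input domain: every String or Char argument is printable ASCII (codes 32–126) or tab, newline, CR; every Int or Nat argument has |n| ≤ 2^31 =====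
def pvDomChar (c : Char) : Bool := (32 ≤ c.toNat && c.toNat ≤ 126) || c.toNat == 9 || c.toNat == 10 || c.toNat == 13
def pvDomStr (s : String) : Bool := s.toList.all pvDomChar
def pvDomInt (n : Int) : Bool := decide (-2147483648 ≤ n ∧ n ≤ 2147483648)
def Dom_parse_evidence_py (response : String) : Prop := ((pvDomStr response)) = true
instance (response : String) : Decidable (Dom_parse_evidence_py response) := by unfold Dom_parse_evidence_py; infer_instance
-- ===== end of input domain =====

-- B partitions the lines into EVIDENCE-blocks first and then maps each block to its
-- dict, replacing A's single stateful scan — an alternative decomposition, same cost.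

-- shared helper: line.split(":")[-1].strip() (split never returns an empty list, so the defaults never fire)
def pvLastSeg (line : String) : String :=
  PySem.Str.strip ((PySem.List.pyGet? ((PySem.Str.split? line ":").getD []) (-1)).getD "")

-- ===== PORT A =====
def pvStepA (st : List (PySem.Dict String String) × PySem.Dict String String)
    (line : String) : List (PySem.Dict String String) × PySem.Dict String String :=
  if PySem.Str.isIn "EVIDENCE:" line then
    ((if st.2.items.isEmpty then st.1 else st.1 ++ [st.2]),
      PySem.Dict.empty.insert "fact" (pvLastSeg line))
  else if PySem.Str.isIn "SOURCE:" line && !st.2.items.isEmpty then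
    (st.1, st.2.insert "source" (pvLastSeg line))
  else if PySem.Str.isIn "RELEVANCE:" line && !st.2.items.isEmpty then
    (st.1, st.2.insert "relevance" (pvLastSeg line))
  else st

-- the trailing 'if current_evidence: evidence.append(...)' and the final return of A
def pvFinishA (st : List (PySem.Dict String String) × PySem.Dict String String) :
    List (List (String × String)) :=
  let evidence := if st.2.items.isEmpty then st.1 else st.1 ++ [st.2]
  if evidence.isEmpty then
    [[("fact", "General observation"), ("source", "5"), ("relevance", "Related")]]
  else evidence.map (·.items)

def parse_evidence_py (response : String) : List (List (String × String)) :=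
  pvFinishA (((PySem.Str.split? response "\n").getD []).foldl pvStepA ([], PySem.Dict.empty))

-- ===== PORT B =====
-- blocks[-1].append(line), transcribed immutably
def pvAppendLast : List (List String) → String → List (List String)
  | [], _ => []
  | [b], l => [b ++ [l]]
  | b :: bs, l => b :: pvAppendLast bs l

def pvBlockStep (blocks : List (List String)) (line : String) : List (List String) :=
  if PySem.Str.isIn "EVIDENCE:" line then blocks ++ [[line]]
  else if !blocks.isEmpty then pvAppendLast blocks line
  else blocks

def pvFieldStep (d : PySem.Dict String String) (line : String) : PySem.Dict String String :=
  if PySem.Str.isIn "SOURCE:" line then d.insert "source" (pvLastSeg line)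
  else if PySem.Str.isIn "RELEVANCE:" line then d.insert "relevance" (pvLastSeg line)
  else d

def pvBlockDict : List String → PySem.Dict String String
  | [] => PySem.Dict.empty
  | h :: t => t.foldl pvFieldStep (PySem.Dict.empty.insert "fact" (pvLastSeg h))

-- 'return result or [default]' of B
def pvFinishB (blocks : List (List String)) : List (List (String × String)) :=
  let result := blocks.map pvBlockDict
  if result.isEmpty then
    [[("fact", "General observation"), ("source", "5"), ("relevance", "Related")]]
  else result.map (·.items)

def parse_evidence_py_alt (response : String) : List (List (String × String)) :=
  pvFinishB (((PySem.Str.split? response "\n").getD []).foldl pvBlockStep [])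

-- ===== PRECONDITION & SPEC =====
def Spec_parse_evidence_py (response : String) (out : List (List (String × String))) : Prop := out = parse_evidence_py_alt response
instance (response : String) (out : List (List (String × String))) : Decidable (Spec_parse_evidence_py response out) := by unfold Spec_parse_evidence_py; infer_instance

-- ===== CLAIM (what is proved, stated in full; the proofs are below) =====
def Claim_equal_parse_evidence_py : Prop := ∀ (response : String), Dom_parse_evidence_py response → Spec_parse_evidence_py response (parse_evidence_py response)

-- ===== LEMMAS AND PROOFS =====

-- the dict of the current (last) block, empty when there is no block yet
def pvCurOf (blocks : List (List String)) : PySem.Dict String String :=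
  ((blocks.getLast?).map pvBlockDict).getD PySem.Dict.empty

theorem pv_insert_items_ne_nil {d : PySem.Dict String String} (k v : String) :
    (d.insert k v).items ≠ [] := by
  by_cases h : d.contains k = true
  · rw [PySem.Dict.items_insert_of_contains _ _ h]
    intro hmap
    have hd : d.items = [] := by
      cases hitems : d.items with
      | nil => rfl
      | cons a l => rw [hitems] at hmap; simp at hmap
    have hk : k ∈ d.keys := (PySem.Dict.contains_iff_mem_keys d k).mp h
    simp [PySem.Dict.keys, hd] at hk
  · rw [PySem.Dict.items_insert_of_not_contains _ _ (by simpa using h)]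
    simp

theorem pv_foldl_field_ne_nil (t : List String) :
    ∀ d : PySem.Dict String String, d.items ≠ [] → (t.foldl pvFieldStep d).items ≠ [] := by
  induction t with
  | nil => intro d h; simpa using h
  | cons l ls ih =>
      intro d h
      refine ih _ ?_
      unfold pvFieldStep
      split_ifs with h1 h2
      · exact pv_insert_items_ne_nil _ _
      · exact pv_insert_items_ne_nil _ _
      · exact h

theorem pv_blockDict_cons_ne_nil (h : String) (t : List String) :
    (pvBlockDict (h :: t)).items ≠ [] :=
  pv_foldl_field_ne_nil t _ (pv_insert_items_ne_nil _ _)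

theorem pv_appendLast_concat (bs : List (List String)) (b : List String) (l : String) :
    pvAppendLast (bs ++ [b]) l = bs ++ [b ++ [l]] := by
  induction bs with
  | nil => rfl
  | cons x xs ih => cases xs <;> simp_all [pvAppendLast]

theorem pv_step_eq (blocks : List (List String))
    (hne : ∀ b ∈ blocks, b ≠ []) (line : String) :
    pvStepA (blocks.dropLast.map pvBlockDict, pvCurOf blocks) line
      = ((pvBlockStep blocks line).dropLast.map pvBlockDict,
          pvCurOf (pvBlockStep blocks line)) := by
  rcases List.eq_nil_or_concat blocks with rfl | ⟨bs, b, rfl⟩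
  · by_cases hE : PySem.Str.isIn "EVIDENCE:" line = true
    · simp_all [pvStepA, pvBlockStep, pvCurOf, pvBlockDict, PySem.Dict.empty]
    · simp_all [pvStepA, pvBlockStep, pvCurOf, PySem.Dict.empty]
  · simp only [List.concat_eq_append] at hne ⊢
    obtain ⟨h, t, rfl⟩ : ∃ h t, b = h :: t := by
      have := hne b (by simp)
      cases b with
      | nil => exact absurd rfl this
      | cons h t => exact ⟨h, t, rfl⟩
    have hni : (List.foldl pvFieldStep (PySem.Dict.empty.insert "fact" (pvLastSeg h)) t).items ≠ [] := by
      simpa [pvBlockDict] using pv_blockDict_cons_ne_nil h t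
    by_cases hE : PySem.Str.isIn "EVIDENCE:" line = true
    · simp_all [pvStepA, pvBlockStep, pvCurOf, pvBlockDict]
    · rw [Bool.not_eq_true] at hE
      simp_all [pvStepA, pvBlockStep, pvCurOf, pvBlockDict, pv_appendLast_concat,
        pvFieldStep, List.foldl_append]
      split_ifs <;> simp_all
theorem pv_inv_step (blocks : List (List String))
    (hne : ∀ b ∈ blocks, b ≠ []) (line : String) :
    ∀ b ∈ pvBlockStep blocks line, b ≠ [] := by
  intro b hb
  rcases List.eq_nil_or_concat blocks with rfl | ⟨bs, c, rfl⟩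
  · unfold pvBlockStep at hb
    split_ifs at hb <;> simp_all
  · simp only [List.concat_eq_append] at hne hb
    unfold pvBlockStep at hb
    split_ifs at hb with h1 h2
    · rcases List.mem_append.mp hb with h | h
      · exact hne b h
      · simp_all
    · rw [pv_appendLast_concat] at hb
      rcases List.mem_append.mp hb with h | h
      · exact hne b (List.mem_append.mpr (Or.inl h))
      · rcases List.mem_singleton.mp h with rfl
        cases c <;> simp_all
    · simp at h2

theorem pv_main (lines : List String) :
    ∀ (blocks : List (List String)), (∀ b ∈ blocks, b ≠ []) →
    lines.foldl pvStepA (blocks.dropLast.map pvBlockDict, pvCurOf blocks)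
      = ((lines.foldl pvBlockStep blocks).dropLast.map pvBlockDict,
          pvCurOf (lines.foldl pvBlockStep blocks)) := by
  induction lines with
  | nil => intro blocks _; rfl
  | cons l ls ih =>
      intro blocks h
      simp only [List.foldl_cons, pv_step_eq blocks h l]
      exact ih _ (pv_inv_step blocks h l)

theorem pv_inv_all (lines : List String) :
    ∀ b ∈ lines.foldl pvBlockStep [], b ≠ [] := by
  have key : ∀ (ls : List String) (blocks : List (List String)), (∀ b ∈ blocks, b ≠ []) →
      ∀ b ∈ ls.foldl pvBlockStep blocks, b ≠ [] := by
    intro ls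
    induction ls with
    | nil => intro blocks h; simpa using h
    | cons l t ih => intro blocks h; exact ih _ (pv_inv_step blocks h l)
  exact key lines [] (by simp)

theorem pv_finish_eq (B : List (List String)) (hne : ∀ b ∈ B, b ≠ []) :
    pvFinishA (B.dropLast.map pvBlockDict, pvCurOf B) = pvFinishB B := by
  rcases List.eq_nil_or_concat B with rfl | ⟨bs, b, rfl⟩
  · simp [pvFinishA, pvFinishB, pvCurOf, PySem.Dict.empty]
  · simp only [List.concat_eq_append] at hne ⊢
    obtain ⟨h, t, rfl⟩ : ∃ h t, b = h :: t := by
      have := hne b (by simp)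
      cases b with
      | nil => exact absurd rfl this
      | cons h t => exact ⟨h, t, rfl⟩
    have hni : (List.foldl pvFieldStep (PySem.Dict.empty.insert "fact" (pvLastSeg h)) t).items ≠ [] := by
      simpa [pvBlockDict] using pv_blockDict_cons_ne_nil h t
    simp_all [pvFinishA, pvFinishB, pvCurOf, pvBlockDict]

-- ===== VERDICT (by name: the statement is the Claim_ definition above) =====
theorem parse_evidence_py_spec : Claim_equal_parse_evidence_py := by
  intro response _
  unfold Spec_parse_evidence_py parse_evidence_py parse_evidence_py_alt
  have h0 : (([] : List (List String)).dropLast.map pvBlockDict, pvCurOf [])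
      = (([] : List (PySem.Dict String String)), PySem.Dict.empty) := rfl
  rw [← h0, pv_main ((PySem.Str.split? response "\n").getD []) [] (by simp)]
  exact pv_finish_eq _ (pv_inv_all _)
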